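-- pv_equiv track=rewrite | github.com/dianaabdirahmanova711-tech/homeworks | lab1/1.task.py | invert_dict_strict
-- ===== SOURCE A (Python) =====
-- def invert_dict_strict(d):
--     counts = {}
--     for v in d.values():
--         if v in counts:
--             counts[v] += 1
--         else:
--             counts[v] = 1
--     res = {}
--     for k, v in d.items():
--         if counts[v] == 1:
--             res[v] = k
--     return res
-- ===== SOURCE B (Python) =====
-- def invert_dict_strict(d):
--     res = {}
--     dup = set()
--     for k, v in d.items():
--         if v in dup:
--             continue
--         if v in res:
--             del res[v]
--             dup.add(v)
--         else:
--             res[v] = k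
--     return res
-- ===== Notes on version B (the rewrite author's own statement) =====
-- stated objective: alternative
-- what changed: Replaces the two-pass count-then-filter (build a Counter of values, then re-scan inserting values with count 1) by a single pass that inserts each value on first sight and retracts it (delete + mark in a duplicate set) on second sight.
import Mathlib
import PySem

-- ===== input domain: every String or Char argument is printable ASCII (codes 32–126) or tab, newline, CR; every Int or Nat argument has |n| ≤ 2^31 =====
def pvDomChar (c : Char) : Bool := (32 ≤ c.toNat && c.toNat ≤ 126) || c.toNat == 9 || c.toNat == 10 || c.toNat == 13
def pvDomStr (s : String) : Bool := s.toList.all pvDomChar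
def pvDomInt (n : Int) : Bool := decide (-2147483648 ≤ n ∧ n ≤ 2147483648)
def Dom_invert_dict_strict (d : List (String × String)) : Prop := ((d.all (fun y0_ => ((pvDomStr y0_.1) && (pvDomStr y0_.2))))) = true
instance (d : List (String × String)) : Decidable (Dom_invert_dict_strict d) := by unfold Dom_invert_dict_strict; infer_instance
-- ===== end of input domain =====

-- B replaces A's two passes (count all values, then re-scan keeping values of count 1) by a single
-- pass that inserts each value on first sight and retracts it on second sight; alternative decomposition, same cost.

-- ===== PORT A =====
def invert_dict_strict (d : List (String × String)) : List (String × String) :=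
  -- counts = {}; for v in d.values(): if v in counts: counts[v] += 1 else: counts[v] = 1
  let counts : PySem.Dict String Int :=
    (d.map Prod.snd).foldl
      (fun c v => if c.contains v then c.insert v (c.getD v 0 + 1) else c.insert v 1)
      PySem.Dict.empty
  -- res = {}; for k, v in d.items(): if counts[v] == 1: res[v] = k
  -- counts[v] ported as getD _ 0: every v of d.items() is a key of counts, so no KeyError is reachable (exact)
  let res : PySem.Dict String String :=
    d.foldl (fun r kv => if counts.getD kv.2 0 == 1 then r.insert kv.2 kv.1 else r)
      PySem.Dict.empty
  res.items

-- ===== PORT B =====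
def invert_dict_strict_alt (d : List (String × String)) : List (String × String) :=
  -- res = {}; dup = set(); one pass: skip if v in dup; retract (del res[v], dup.add(v)) if v in res; else res[v] = k
  (d.foldl
      (fun (st : PySem.Dict String String × PySem.Set String) kv =>
        if st.2.contains kv.2 then st
        else if st.1.contains kv.2 then (st.1.erase kv.2, st.2.add kv.2)
        else (st.1.insert kv.2 kv.1, st.2))
      (PySem.Dict.empty, PySem.Set.empty)).1.items

-- ===== PRECONDITION & SPEC =====
def Spec_invert_dict_strict (d : List (String × String)) (out : List (String × String)) : Prop := out = invert_dict_strict_alt d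
instance (d : List (String × String)) (out : List (String × String)) : Decidable (Spec_invert_dict_strict d out) := by unfold Spec_invert_dict_strict; infer_instance

-- ===== CLAIM (what is proved, stated in full; the proofs are below) =====
def Claim_equal_invert_dict_strict : Prop := ∀ (d : List (String × String)), Dom_invert_dict_strict d → Spec_invert_dict_strict d (invert_dict_strict d)

-- ===== LEMMAS AND PROOFS =====

-- the common characterisation both ports are reduced to: pairs whose value occurs exactly once, in order, swapped
def pvP (d : List (String × String)) (kv : String × String) : Bool :=
  (d.map Prod.snd).count kv.2 = 1

def pvSpecList (d : List (String × String)) : List (String × String) :=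
  (d.filter (pvP d)).map (fun kv => (kv.2, kv.1))

theorem pv_count_append (q : List (String × String)) (x : String × String) (w : String) :
    ((q ++ [x]).map Prod.snd).count w
      = (q.map Prod.snd).count w + (if x.2 = w then 1 else 0) := by
  by_cases h : x.2 = w <;> simp [List.count_append, h]

theorem pv_mem_filtered (d : List (String × String)) (v : String) :
    v ∈ (d.filter (pvP d)).map (fun kv => kv.2) ↔ (d.map Prod.snd).count v = 1 := by
  constructor
  · rintro h
    obtain ⟨kv, hkv, rfl⟩ := List.mem_map.mp h
    have := (List.mem_filter.mp hkv).2
    simpa [pvP] using this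
  · intro h
    have hv : v ∈ d.map Prod.snd := by
      rw [← List.count_pos_iff]; omega
    obtain ⟨kv, hkv, rfl⟩ := List.mem_map.mp hv
    exact List.mem_map.mpr ⟨kv, List.mem_filter.mpr ⟨hkv, by simpa [pvP] using h⟩, rfl⟩

theorem pv_nodup_filtered (d : List (String × String)) :
    ((d.filter (pvP d)).map (fun kv => kv.2)).Nodup := by
  rw [List.nodup_iff_count_le_one]
  intro a
  by_cases h : a ∈ (d.filter (pvP d)).map (fun kv => kv.2)
  · have h1 : (d.map Prod.snd).count a = 1 := (pv_mem_filtered d a).mp h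
    have hsub : List.Sublist ((d.filter (pvP d)).map (fun kv => kv.2)) (d.map Prod.snd) := by
      have := (d.filter_sublist (p := pvP d)).map (f := fun kv : String × String => kv.2)
      simpa [show (fun kv : String × String => kv.2) = Prod.snd from rfl] using this
    have := hsub.count_le a
    omega
  · simp [List.count_eq_zero_of_not_mem h]

-- A's second loop: inserting at pairwise-fresh keys appends in order
theorem pv_foldA (P : String × String → Bool) :
    ∀ (l : List (String × String)) (r : PySem.Dict String String),
    (r.keys ++ (l.filter P).map (fun kv => kv.2)).Nodup →
    (l.foldl (fun r kv => if P kv then r.insert kv.2 kv.1 else r) r).items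
      = r.items ++ (l.filter P).map (fun kv => (kv.2, kv.1)) := by
  intro l
  induction l with
  | nil => intro r _; simp
  | cons x l ih =>
    intro r h
    by_cases hp : P x
    · rw [List.filter_cons_of_pos hp] at h ⊢
      obtain ⟨hn1, hn2, hdisj⟩ := List.nodup_append.mp h
      have hx2 : x.2 ∉ r.keys := fun hmem => hdisj x.2 hmem x.2 (by simp) rfl
      have hco : r.contains x.2 = false := by
        rw [PySem.Dict.contains_eq_decide_mem_keys]; simp [hx2]
      simp only [List.foldl_cons, hp, if_pos]
      rw [ih (r.insert x.2 x.1) ?_]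
      · rw [PySem.Dict.items_insert_of_not_contains _ _ hco]
        simp
      · rw [PySem.Dict.keys_insert_of_not_contains _ _ hco]
        rw [List.append_assoc]
        simpa using h
    · rw [List.filter_cons_of_neg hp] at h ⊢
      simpa [hp] using ih r h

theorem pvA_counts (d : List (String × String)) :
    ∀ v, ((d.map Prod.snd).foldl
        (fun c v => if c.contains v then c.insert v (c.getD v 0 + 1) else c.insert v 1)
        (PySem.Dict.empty : PySem.Dict String Int)).getD v 0 = ((d.map Prod.snd).count v : Int) := by
  intro v
  have hfun : (fun (c : PySem.Dict String Int) v => if c.contains v then c.insert v (c.getD v 0 + 1) else c.insert v 1)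
      = fun (c : PySem.Dict String Int) v => c.insert v (c.getD v 0 + 1) := by
    funext c v
    by_cases h : c.contains v = true
    · simp [h]
    · have h' : c.contains v = false := by simpa using h
      simp [h', PySem.Dict.getD_of_not_contains _ _ h']
  rw [hfun, PySem.Dict.getD_foldl_insert_add_one]
  simp

theorem pvA_eq_spec (d : List (String × String)) : invert_dict_strict d = pvSpecList d := by
  have key : ∀ (counts : PySem.Dict String Int),
      (∀ v, counts.getD v 0 = ((d.map Prod.snd).count v : Int)) →
      (d.foldl (fun r kv => if counts.getD kv.2 0 == 1 then r.insert kv.2 kv.1 else r)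
        PySem.Dict.empty).items = pvSpecList d := by
    intro counts hcount
    have hpred : ∀ kv : String × String, (counts.getD kv.2 0 == 1) = pvP d kv := by
      intro kv
      rw [hcount kv.2]
      by_cases h : (d.map Prod.snd).count kv.2 = 1
      · simp [pvP, h]
      · have h' : ¬ (((d.map Prod.snd).count kv.2 : Int) = 1) := by exact_mod_cast h
        simp [pvP, h, h']
    simp only [hpred]
    rw [pv_foldA (pvP d) d PySem.Dict.empty (by simpa using pv_nodup_filtered d)]
    simp [pvSpecList, PySem.Dict.empty]
  exact key _ (pvA_counts d)

-- ===== B side =====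
def pvStep (st : PySem.Dict String String × PySem.Set String) (kv : String × String) :
    PySem.Dict String String × PySem.Set String :=
  if st.2.contains kv.2 then st
  else if st.1.contains kv.2 then (st.1.erase kv.2, st.2.add kv.2)
  else (st.1.insert kv.2 kv.1, st.2)

def pvBstate (q : List (String × String)) : PySem.Dict String String × PySem.Set String :=
  q.foldl pvStep (PySem.Dict.empty, PySem.Set.empty)

theorem pvB_inv (q : List (String × String)) :
    (∀ w, (pvBstate q).2.contains w = true ↔ 2 ≤ (q.map Prod.snd).count w)
    ∧ (pvBstate q).1.items = (q.filter (pvP q)).map (fun kv => (kv.2, kv.1)) := by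
  induction q using List.reverseRecOn with
  | nil =>
    constructor
    · intro w; simp [pvBstate, PySem.Set.contains, PySem.Set.empty]
    · simp [pvBstate, PySem.Dict.empty]
  | append_singleton q x ih =>
    obtain ⟨ihd, ihi⟩ := ih
    have hstate : pvBstate (q ++ [x]) = pvStep (pvBstate q) x := by
      simp [pvBstate, List.foldl_append]
    have hkeys : ∀ v, (pvBstate q).1.contains v = true ↔ (q.map Prod.snd).count v = 1 := by
      intro v
      rw [PySem.Dict.contains_eq_decide_mem_keys, decide_eq_true_iff]
      have hk : (pvBstate q).1.keys = (q.filter (pvP q)).map (fun kv => kv.2) := by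
        show (pvBstate q).1.items.map Prod.fst = _
        rw [ihi]; simp [Function.comp]
      rw [hk]
      exact pv_mem_filtered q v
    by_cases hdup : (pvBstate q).2.contains x.2 = true
    · -- value already seen at least twice: state unchanged
      have hc2 : 2 ≤ (q.map Prod.snd).count x.2 := (ihd x.2).mp hdup
      have hst : pvBstate (q ++ [x]) = pvBstate q := by rw [hstate]; unfold pvStep; rw [if_pos hdup]
      rw [hst]
      constructor
      · intro w
        rw [ihd w, pv_count_append]
        by_cases hw : x.2 = w
        · subst hw; rw [if_pos rfl]; omega
        · rw [if_neg hw]; omega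
      · rw [ihi, List.filter_append]
        have hx : pvP (q ++ [x]) x = false := by
          have h := pv_count_append q x x.2
          rw [if_pos rfl] at h
          simp only [pvP, h, decide_eq_false_iff_not]
          omega
        rw [List.filter_singleton, hx]
        have hcong : List.filter (pvP (q ++ [x])) q = List.filter (pvP q) q := by
          apply List.filter_congr
          intro kv _
          simp only [pvP, pv_count_append]
          by_cases hw : x.2 = kv.2
          · rw [← hw]
            simp; omega
          · simp [hw]
        rw [hcong]; simp
    · by_cases hres : (pvBstate q).1.contains x.2 = true
      · -- second sighting: retract the entry and mark duplicate
        have hc1 : (q.map Prod.snd).count x.2 = 1 := (hkeys x.2).mp hres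
        have hst : pvBstate (q ++ [x])
            = ((pvBstate q).1.erase x.2, (pvBstate q).2.add x.2) := by
          rw [hstate]; unfold pvStep; rw [if_neg hdup, if_pos hres]
        rw [hst]
        constructor
        · intro w
          have : ((pvBstate q).2.add x.2).contains w = true ↔ w ∈ (pvBstate q).2 ∨ w = x.2 := by
            rw [← PySem.Set.mem_add]
            simp [PySem.Set.contains]
          rw [this, pv_count_append]
          have hmem : w ∈ (pvBstate q).2 ↔ (pvBstate q).2.contains w = true := by
            simp [PySem.Set.contains]
          rw [hmem, ihd w]
          by_cases hw : x.2 = w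
          · subst hw
            rw [if_pos rfl]
            exact ⟨fun _ => by omega, fun _ => Or.inr rfl⟩
          · rw [if_neg hw]
            constructor
            · rintro (h2 | h2)
              · omega
              · exact absurd h2.symm hw
            · intro h2; exact Or.inl (by omega)
        · show (pvBstate q).1.items.filter (fun p => !(p.1 == x.2)) = _
          rw [ihi, List.filter_map]
          rw [List.filter_append]
          have hx : pvP (q ++ [x]) x = false := by
            have h := pv_count_append q x x.2
            rw [if_pos rfl] at h
            simp only [pvP, h, decide_eq_false_iff_not]
            omega
          rw [List.filter_singleton, hx]
          have hcong : List.filter (pvP (q ++ [x])) q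
              = List.filter (fun kv => pvP q kv && !(kv.2 == x.2)) q := by
            apply List.filter_congr
            intro kv _
            simp only [pvP, pv_count_append]
            by_cases hw : x.2 = kv.2
            · rw [← hw]
              simp [hc1]
            · simp [hw, Ne.symm hw]
          rw [hcong]
          simp [Function.comp, List.filter_filter, Bool.and_comm]
      · -- first sighting: insert
        have hc0 : (q.map Prod.snd).count x.2 = 0 := by
          have h2 : ¬ 2 ≤ (q.map Prod.snd).count x.2 := fun h => hdup ((ihd x.2).mpr h)
          have h1 : ¬ (q.map Prod.snd).count x.2 = 1 := fun h => hres ((hkeys x.2).mpr h)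
          omega
        have hst : pvBstate (q ++ [x])
            = ((pvBstate q).1.insert x.2 x.1, (pvBstate q).2) := by
          rw [hstate]; unfold pvStep; rw [if_neg hdup, if_neg hres]
        rw [hst]
        have hnotv : ∀ kv ∈ q, kv.2 ≠ x.2 := by
          intro kv hkv heq
          have : x.2 ∈ q.map Prod.snd := List.mem_map.mpr ⟨kv, hkv, heq⟩
          rw [← List.count_pos_iff] at this
          omega
        constructor
        · intro w
          rw [ihd w, pv_count_append]
          by_cases hw : x.2 = w
          · subst hw; rw [if_pos rfl]; omega
          · rw [if_neg hw]; omega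
        · have hcof : (pvBstate q).1.contains x.2 = false := by simpa using hres
          rw [PySem.Dict.items_insert_of_not_contains _ _ hcof, ihi]
          rw [List.filter_append]
          have hx : pvP (q ++ [x]) x = true := by
            simp [pvP, hc0]
          rw [List.filter_singleton, hx]
          have hcong : List.filter (pvP (q ++ [x])) q = List.filter (pvP q) q := by
            apply List.filter_congr
            intro kv hkv
            simp only [pvP, pv_count_append]
            simp [Ne.symm (hnotv kv hkv)]
          rw [hcong]
          simp

theorem pvB_eq_spec (d : List (String × String)) : invert_dict_strict_alt d = pvSpecList d := by
  have : invert_dict_strict_alt d = (pvBstate d).1.items := rfl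
  rw [this, (pvB_inv d).2]
  rfl

-- ===== VERDICT (by name: the statement is the Claim_ definition above) =====
theorem invert_dict_strict_spec : Claim_equal_invert_dict_strict := by
  intro d _
  unfold Spec_invert_dict_strict
  rw [pvA_eq_spec, pvB_eq_spec]
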